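-- pv_equiv track=rewrite | github.com/pcurry/Math-toys | python/ackermann.py | ackermann_peter_faster
-- ===== SOURCE A (Python) =====
-- class InvalidInputException(Exception):
--     pass
--
-- partial_funcs = {0: lambda n: n + 1,
--                  1: lambda n: n + 2,
--                  2: lambda n: 2 * n + 3}
--
-- def ackermann_peter_faster(m, n):
--     """
--
--     """
--     if m < 0 or n < 0:
--         raise InvalidInputException("m and n both need to be greater than 0")
--     elif m >= 0 and m <= 2:
--         return partial_funcs[m](n)
--     elif m == 3:
--         try:
--             result = (1 << (n + 3)) - 3
--         except OverflowError:
--             result = (2 ** (n + 3)) - 3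
--         return result
--     elif n == 0:
--         return ackermann_peter_faster(m - 1, 1)
--     else:
--         return ackermann_peter_faster(m - 1, ackermann_peter_faster(m, n - 1))
-- ===== SOURCE B (Python) =====
-- class InvalidInputException(Exception):
--     pass
--
-- def ackermann_peter_faster(m, n):
--     if m < 0 or n < 0:
--         raise InvalidInputException("m and n both need to be greater than 0")
--
--     def ack(m, n):
--         # single recursion on m: for m >= 4, A(m, n) = (A(m-1, .))^n (A(m-1, 1))
--         if m == 0:
--             return n + 1
--         if m == 1:
--             return n + 2
--         if m == 2:
--             return 2 * n + 3
--         if m == 3: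
--             return 2 ** (n + 3) - 3
--         v = ack(m - 1, 1)
--         for _ in range(n):
--             v = ack(m - 1, v)
--         return v
--
--     return ack(m, n)
-- ===== Notes on version B (the rewrite author's own statement) =====
-- stated objective: alternative
-- what changed: Replaces A's double recursion (recursing on n with a nested self-call as argument) by a single recursion on m alone: for m>=4, A(m,n) is computed as the n-fold iteration of A(m-1,.) starting from A(m-1,1), with the m<=3 closed forms as base cases.
import Mathlib
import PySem

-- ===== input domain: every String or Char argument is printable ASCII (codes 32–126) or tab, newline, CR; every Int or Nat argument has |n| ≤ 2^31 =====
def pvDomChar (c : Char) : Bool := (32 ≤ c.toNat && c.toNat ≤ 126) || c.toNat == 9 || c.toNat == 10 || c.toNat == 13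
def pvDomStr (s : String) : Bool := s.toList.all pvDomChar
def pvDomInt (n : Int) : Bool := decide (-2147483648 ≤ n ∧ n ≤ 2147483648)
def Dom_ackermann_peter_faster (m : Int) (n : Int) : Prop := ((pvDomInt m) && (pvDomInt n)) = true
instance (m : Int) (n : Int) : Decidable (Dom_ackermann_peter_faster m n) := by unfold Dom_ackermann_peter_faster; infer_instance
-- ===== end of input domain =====

-- B replaces A's double recursion by a single recursion on m with an inner n-fold iteration
-- (alternative decomposition, same asymptotic cost). Both raise on m<0 or n<0 (excluded by Pre_).

-- ===== PORT A =====
-- Literal port of A's double recursion. The 'raise' branch is excluded by Pre_ (port returns 0 there).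
-- partial_funcs[m](n) for m in {0,1,2} is ported as the corresponding arithmetic expression;
-- the try/except on 1 << (n+3) cannot overflow in Python 3, both branches equal 2^(n+3) - 3.
def ackermann_peter_faster (m : Int) (n : Int) : Int :=
  if m < 0 ∨ n < 0 then 0
  else if 0 ≤ m ∧ m ≤ 2 then
    (if m = 0 then n + 1 else if m = 1 then n + 2 else 2 * n + 3)
  else if m = 3 then 2 ^ (n + 3).toNat - 3
  else if n = 0 then ackermann_peter_faster (m - 1) 1
  else ackermann_peter_faster (m - 1) (ackermann_peter_faster m (n - 1))
termination_by (m.toNat, n.toNat)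
decreasing_by
  · apply Prod.Lex.left; omega
  · apply Prod.Lex.right; omega
  · apply Prod.Lex.left; omega

-- ===== PORT B =====
-- inner helper 'ack' of Source B: recursion on m (as a Nat), loop 'for _ in range(n)' as iterate
def ackB : Nat → Int → Int
  | 0, n => n + 1
  | 1, n => n + 2
  | 2, n => 2 * n + 3
  | 3, n => 2 ^ (n + 3).toNat - 3
  | m + 4, n => (fun v => ackB (m + 3) v)^[n.toNat] (ackB (m + 3) 1)

def ackermann_peter_faster_alt (m : Int) (n : Int) : Int :=
  if m < 0 ∨ n < 0 then 0 else ackB m.toNat n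

-- ===== PRECONDITION & SPEC =====
-- Pre_: A raises InvalidInputException when m < 0 or n < 0; beyond the listed (m, n) region
-- (m ≥ 5 with n ≥ 1, m ≥ 6, or m = 4 with n ≥ 3) A's deep double recursion raises
-- RecursionError (CPython recursion limit) or exhausts memory, so those inputs are excluded too.
def Pre_ackermann_peter_faster (m : Int) (n : Int) : Prop :=
  0 ≤ m ∧ 0 ≤ n ∧ (m ≤ 3 ∨ (m = 4 ∧ n ≤ 2) ∨ (m = 5 ∧ n = 0))
instance (m : Int) (n : Int) : Decidable (Pre_ackermann_peter_faster m n) := by unfold Pre_ackermann_peter_faster; infer_instance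
def pvWitness_ackermann_peter_faster : Int × Int := (4, 1)

def Spec_ackermann_peter_faster (m : Int) (n : Int) (out : Int) : Prop := out = ackermann_peter_faster_alt m n
instance (m : Int) (n : Int) (out : Int) : Decidable (Spec_ackermann_peter_faster m n out) := by unfold Spec_ackermann_peter_faster; infer_instance

-- ===== CLAIM (what is proved, stated in full; the proofs are below) =====
def Claim_equal_ackermann_peter_faster : Prop := ∀ (m : Int) (n : Int), Dom_ackermann_peter_faster m n → Pre_ackermann_peter_faster m n → Spec_ackermann_peter_faster m n (ackermann_peter_faster m n)

-- ===== LEMMAS AND PROOFS =====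

-- ackB preserves nonnegativity (needed to feed inner results to the outer IH)
lemma ackB_nonneg : ∀ (k : Nat) (n : Int), 0 ≤ n → 0 ≤ ackB k n := by
  intro k
  induction k using Nat.strong_induction_on with
  | _ k ih =>
    match k with
    | 0 => intro n hn; simp [ackB]; omega
    | 1 => intro n hn; simp [ackB]; omega
    | 2 => intro n hn; simp [ackB]; omega
    | 3 =>
      intro n hn; simp only [ackB]
      have h3 : 3 ≤ (n + 3).toNat := by omega
      have : (2:Int) ^ 3 ≤ 2 ^ (n + 3).toNat := by
        exact pow_le_pow_right₀ (by norm_num) h3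
      norm_num at this ⊢; omega
    | k + 4 =>
      intro n hn
      simp only [ackB]
      have hstep : ∀ v : Int, 0 ≤ v → 0 ≤ ackB (k + 3) v := ih (k + 3) (by omega)
      have : ∀ t v, 0 ≤ v → 0 ≤ (fun v => ackB (k + 3) v)^[t] v := by
        intro t
        induction t with
        | zero => intro v hv; simpa using hv
        | succ t iht =>
          intro v hv
          rw [Function.iterate_succ_apply']
          exact hstep _ (iht v hv)
      exact this n.toNat _ (hstep 1 (by norm_num))

-- ackB satisfies A's recurrence at m ≥ 4
lemma ackB_rec (k : Nat) (n : Int) (hn : 0 ≤ n) :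
    ackB (k + 4) n = if n = 0 then ackB (k + 3) 1
                     else ackB (k + 3) (ackB (k + 4) (n - 1)) := by
  by_cases h0 : n = 0
  · simp [h0, ackB]
  · have hpos : 0 < n := by omega
    obtain ⟨t, ht⟩ : ∃ t, n.toNat = t + 1 := ⟨n.toNat - 1, by omega⟩
    have ht' : (n - 1).toNat = t := by omega
    simp only [ackB, h0, if_false, ht, ht', Function.iterate_succ_apply']

theorem ack_eq : ∀ (m n : Int), 0 ≤ m → 0 ≤ n →
    ackermann_peter_faster m n = ackB m.toNat n := by
  intro m n
  induction m, n using ackermann_peter_faster.induct with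
  | case1 m n h => intro hm hn; omega
  | case2 n h h2 => intro _ hn; rw [ackermann_peter_faster]; simp [h2, ackB]; omega
  | case3 n h h2 h3 => intro _ hn; rw [ackermann_peter_faster]; simp [h2, ackB]; omega
  | case4 m n h h2 h3 h4 =>
    intro _ _
    have hm2 : m = 2 := by omega
    subst hm2
    rw [ackermann_peter_faster]; simp [h2, ackB]; omega
  | case5 n h h2 => intro _ hn; rw [ackermann_peter_faster]; simp [ackB]; intro hc; exact absurd hc (by omega)
  | case6 m h2 h3 h6 ih =>
    intro hm _
    have hm4 : 4 ≤ m := by omega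
    obtain ⟨k, hk⟩ : ∃ k, m.toNat = k + 4 := ⟨m.toNat - 4, by omega⟩
    have h1 : (m - 1).toNat = k + 3 := by omega
    rw [ackermann_peter_faster]
    rw [if_neg h6, if_neg h2, if_neg h3, if_pos rfl]
    rw [ih (by omega) (by norm_num), h1, hk, ackB_rec k 0 le_rfl, if_pos rfl]
  | case7 m n h h2 h3 h4 ih2 ih1 =>
    intro hm hn
    have hm4 : 4 ≤ m := by omega
    obtain ⟨k, hk⟩ : ∃ k, m.toNat = k + 4 := ⟨m.toNat - 4, by omega⟩
    have h1 : (m - 1).toNat = k + 3 := by omega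
    rw [ackermann_peter_faster]
    rw [if_neg h, if_neg h2, if_neg h3, if_neg h4]
    have hinner : ackermann_peter_faster m (n - 1) = ackB (k + 4) (n - 1) := by
      rw [ih2 hm (by omega), hk]
    have hnn : 0 ≤ ackermann_peter_faster m (n - 1) := by
      rw [hinner]; exact ackB_nonneg _ _ (by omega)
    rw [ih1 (by omega) hnn, hinner, h1, hk, ackB_rec k n hn, if_neg h4]

-- ===== VERDICT (by name: the statement is the Claim_ definition above) =====
theorem ackermann_peter_faster_spec : Claim_equal_ackermann_peter_faster := by
  intro m n _ hpre
  obtain ⟨hm, hn, -⟩ := hpre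
  unfold Spec_ackermann_peter_faster ackermann_peter_faster_alt
  rw [if_neg (by omega), ack_eq m n hm hn]
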